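-- pv_equiv track=rewrite | github.com/caleberi/leetcody | python/numberOfDistinctSubstringPresent.py | numberOfDistinctSubstringPresent
-- ===== SOURCE A (Python) =====
-- def numberOfDistinctSubstringPresent(string):
--     ret = []
--     for i in range(len(string)):
--         s = []
--         for j in range(i, len(string)):
--             substring = string[i:j+1]
--             if isDistinct(substring):
--                 s.append(substring)
--             else:
--                 break
--         ret.extend(s)
--     return len(ret)
--
-- def isDistinct(string):
--     h = {}
--     prev = ""
--     for i in range(len(string)):
--         ch = string[i]
--         if ch not in h:
--             if prev == "":
--                 prev = ch
--             if prev != "" and prev != ch: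
--                 return False
--             h[ch] = True
--     return True
-- ===== SOURCE B (Python) =====
-- def numberOfDistinctSubstringPresent(string):
--     total = 0
--     run = 0
--     prev = None
--     for ch in string:
--         if prev == ch:
--             run += 1
--         else:
--             run = 1
--             prev = ch
--         total += run
--     return total
-- ===== Notes on version B (the rewrite author's own statement) =====
-- stated objective: faster
-- what changed: Replaces the quadratic start-index/end-index scan that builds each substring and tests it with a dict-based all-equal check by a single left-to-right pass maintaining the current run length and adding it at each position.
import Mathlib
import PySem

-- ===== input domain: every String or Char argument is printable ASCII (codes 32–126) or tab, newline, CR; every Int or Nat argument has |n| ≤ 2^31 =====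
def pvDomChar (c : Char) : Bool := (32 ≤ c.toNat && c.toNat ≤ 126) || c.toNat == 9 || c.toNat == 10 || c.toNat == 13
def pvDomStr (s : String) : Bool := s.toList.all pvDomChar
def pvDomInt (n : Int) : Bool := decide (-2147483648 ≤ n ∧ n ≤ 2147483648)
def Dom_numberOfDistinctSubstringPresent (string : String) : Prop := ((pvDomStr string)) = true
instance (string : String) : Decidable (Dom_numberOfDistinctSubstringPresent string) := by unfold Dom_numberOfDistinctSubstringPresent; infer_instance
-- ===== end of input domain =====

-- B replaces A's quadratic two-index scan (building each substring and testing it with a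
-- dict-based all-equal check) by a single pass maintaining the current run length: faster.

-- ===== PORT A =====
-- port of helper isDistinct: the loop 'for i in range(len(string)): ch = string[i]' reads the
-- characters in order, ported as structural recursion over the char list; prev = "" is `none`.
def isDistinctGo : List Char → PySem.Dict Char Bool → Option Char → Bool
  | [], _, _ => true
  | ch :: rest, h, prev =>
    if h.contains ch then isDistinctGo rest h prev
    else
      let prev' := if prev = none then some ch else prev
      if prev' ≠ none ∧ prev' ≠ some ch then false
      else isDistinctGo rest (h.insert ch true) prev'

def isDistinctA (l : List Char) : Bool := isDistinctGo l PySem.Dict.empty none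

-- inner 'for j in range(i, len(string))' loop with its break, over the range list
def innerA (cs : List Char) (i : Int) : List Int → List (List Char)
  | [] => []
  | j :: js =>
    let sub := PySem.List.slice cs (some i) (some (j + 1))
    if isDistinctA sub then sub :: innerA cs i js else []

def numberOfDistinctSubstringPresent (string : String) : Int :=
  let cs := string.toList
  let n : Int := PySem.List.len cs
  let ret := (PySem.List.pyRange 0 n 1).foldl
    (fun ret i => ret ++ innerA cs i (PySem.List.pyRange i n 1)) []
  PySem.List.len ret

-- ===== PORT B =====
def altGo : List Char → Int → Int → Option Char → Int
  | [], total, _, _ => total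
  | c :: rest, total, run, prev =>
    if prev = some c then altGo rest (total + (run + 1)) (run + 1) prev
    else altGo rest (total + 1) 1 (some c)

def numberOfDistinctSubstringPresent_alt (string : String) : Int :=
  altGo string.toList 0 0 none

-- ===== PRECONDITION & SPEC =====
def Spec_numberOfDistinctSubstringPresent (string : String) (out : Int) : Prop := out = numberOfDistinctSubstringPresent_alt string
instance (string : String) (out : Int) : Decidable (Spec_numberOfDistinctSubstringPresent string out) := by unfold Spec_numberOfDistinctSubstringPresent; infer_instance

-- ===== CLAIM (what is proved, stated in full; the proofs are below) =====
def Claim_equal_numberOfDistinctSubstringPresent : Prop := ∀ (string : String), Dom_numberOfDistinctSubstringPresent string → Spec_numberOfDistinctSubstringPresent string (numberOfDistinctSubstringPresent string)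

-- ===== LEMMAS AND PROOFS =====

-- the common yardstick: sum over each position of (1 + length of the equal-char run after it)
def startSum : List Char → Int
  | [] => 0
  | c :: r => (1 + ((r.takeWhile (· == c)).length : Int)) + startSum r

-- ---- B side ----

theorem altGo_add (cs : List Char) : ∀ (t run : Int) (prev : Option Char),
    altGo cs t run prev = t + altGo cs 0 run prev := by
  induction cs with
  | nil => intro t run prev; simp [altGo]
  | cons c rest ih =>
    intro t run prev
    simp only [altGo]
    by_cases h : prev = some c
    · rw [if_pos h, if_pos h, ih (t + (run + 1)), ih (0 + (run + 1))]; ring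
    · rw [if_neg h, if_neg h, ih (t + 1), ih (0 + 1)]; ring

def prefLen : Option Char → List Char → Int
  | none, _ => 0
  | some c, cs => ((cs.takeWhile (· == c)).length : Int)

theorem altGo_spec (cs : List Char) : ∀ (run : Int) (prev : Option Char),
    altGo cs 0 run prev = startSum cs + run * prefLen prev cs := by
  induction cs with
  | nil => intro run prev; cases prev <;> simp [altGo, startSum, prefLen]
  | cons c rest ih =>
    intro run prev
    by_cases h : prev = some c
    · subst h
      have h1 : altGo (c :: rest) 0 run (some c) = altGo rest (0 + (run + 1)) (run + 1) (some c) := by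
        simp [altGo]
      rw [h1, altGo_add, ih]
      simp [startSum, prefLen]
      ring
    · simp only [altGo, if_neg h]
      rw [altGo_add, ih]
      have hpre : prefLen prev (c :: rest) = 0 := by
        cases prev with
        | none => rfl
        | some p =>
          have hpc : ¬ (c == p) = true := by
            intro he; exact h (by simp [(beq_iff_eq).mp he])
          simp [prefLen, hpc]
      rw [hpre]
      simp only [startSum, prefLen]
      ring

theorem alt_eq_startSum (s : String) :
    numberOfDistinctSubstringPresent_alt s = startSum s.toList := by
  unfold numberOfDistinctSubstringPresent_alt
  rw [altGo_spec]
  simp [prefLen]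

-- ---- A side ----

-- what isDistinct computes: all characters equal
def allEq : List Char → Bool
  | [] => true
  | c :: r => r.all (· == c)

theorem isDistinctGo_run (c : Char) : ∀ (rest : List Char),
    isDistinctGo rest (PySem.Dict.empty.insert c true) (some c) = rest.all (· == c) := by
  intro rest
  induction rest with
  | nil => simp [isDistinctGo]
  | cons d r ih =>
    simp only [isDistinctGo, PySem.Dict.contains_insert, PySem.Dict.contains_empty]
    by_cases h : d = c
    · subst h; simpa using ih
    · have hb : ¬ (d == c) = true := by simpa using h
      simp [hb, List.all_cons]
      intro he
      exact absurd he.symm h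

theorem isDistinctA_eq_allEq (l : List Char) : isDistinctA l = allEq l := by
  cases l with
  | nil => rfl
  | cons c r =>
    simp only [isDistinctA, isDistinctGo, allEq, PySem.Dict.contains_empty]
    simpa using isDistinctGo_run c r

theorem allEq_replicate_append (k : Nat) (hk : 1 ≤ k) (c d : Char) :
    allEq (List.replicate k c ++ [d]) = (d == c) := by
  obtain ⟨k', rfl⟩ : ∃ k', k = k' + 1 := ⟨k - 1, by omega⟩
  simp [allEq, List.replicate_succ, List.all_append]

-- the inner loop, once at least one accepted character: counts the remaining run of c
theorem innerA_len (cs : List Char) (i : Int) (hi : 0 ≤ i) (c : Char) :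
    ∀ (m : Nat) (j : Int), i < j → j ≤ PySem.List.len cs →
    cs.length - j.toNat = m →
    (cs.drop i.toNat).take (j.toNat - i.toNat) = List.replicate (j.toNat - i.toNat) c →
    ((innerA cs i (PySem.List.pyRange j (PySem.List.len cs) 1)).length : Int)
      = (((cs.drop j.toNat).takeWhile (· == c)).length : Int) := by
  intro m
  induction m with
  | zero =>
    intro j hij hjn hm _
    have hlen : j = (cs.length : Int) := by
      simp [PySem.List.len] at hjn; omega
    subst hlen
    rw [PySem.List.pyRange_one_eq_nil (by simp [PySem.List.len])]
    simp [innerA]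
  | succ m ih =>
    intro j hij hjn hm hrep
    have hjlt : j < PySem.List.len cs := by
      simp [PySem.List.len] at hjn ⊢; omega
    have h0j : 0 ≤ j := by omega
    have hjnat : j.toNat < cs.length := by
      simp [PySem.List.len] at hjlt; omega
    rw [PySem.List.pyRange_one_cons hjlt]
    simp only [innerA]
    set t := cs.drop i.toNat with ht
    have hm0 : 1 ≤ j.toNat - i.toNat := by omega
    set m0 := j.toNat - i.toNat with hm0def
    have htlen : m0 < t.length := by
      simp [ht, List.length_drop]; omega
    have hsub : PySem.List.slice cs (some i) (some (j + 1)) = t.take m0 ++ [t[m0]] := by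
      rw [PySem.List.slice_toNat cs hi (by omega)]
      have : (j + 1).toNat - i.toNat = m0 + 1 := by omega
      rw [this, ← ht, List.take_add_one]
      simp [List.getElem?_eq_getElem htlen]
    have hdropj : cs.drop j.toNat = t[m0] :: t.drop (m0 + 1) := by
      have h1 : cs.drop j.toNat = t.drop m0 := by
        rw [ht, List.drop_drop]
        congr 1; omega
      rw [h1, List.drop_eq_getElem_cons htlen]
    rw [hsub, hrep]
    rw [isDistinctA_eq_allEq, allEq_replicate_append m0 hm0]
    by_cases hd : t[m0] = c
    · rw [if_pos (by simpa using hd)]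
      simp only [List.length_cons]
      push_cast
      have hih := ih (j + 1) (by omega) (by simp [PySem.List.len] at hjlt ⊢; omega)
        (by omega)
        (by
          have h2 : (j + 1).toNat - i.toNat = m0 + 1 := by omega
          rw [h2, List.take_add_one, hrep, List.getElem?_eq_getElem htlen, hd]
          simp [List.replicate_succ'])
      push_cast at hih
      rw [hih, hdropj, List.takeWhile_cons]
      have hbt : (t[m0] == c) = true := by simpa using hd
      rw [hbt]
      have hdrop1 : List.drop (m0 + 1) t = cs.drop (j + 1).toNat := by
        rw [ht, List.drop_drop]; congr 1; omega
      rw [if_pos rfl, List.length_cons, hdrop1]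
      push_cast
      ring
    · have hbf : (t[m0] == c) = false := by
        simpa using hd
      rw [if_neg (by simp [hbf]), hdropj, List.takeWhile_cons, hbf]
      simp

-- per-start-index value: 1 + the length of the equal-char run after position k
def runAt (cs : List Char) (k : Nat) : Int :=
  match cs.drop k with
  | [] => 0
  | c :: r => 1 + ((r.takeWhile (· == c)).length : Int)

-- the full inner loop starting at a valid index i
theorem innerA_total (cs : List Char) (i : Int) (hi : 0 ≤ i)
    (hin : i < PySem.List.len cs) :
    ((innerA cs i (PySem.List.pyRange i (PySem.List.len cs) 1)).length : Int)
      = runAt cs i.toNat := by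
  have hinat : i.toNat < cs.length := by
    simp [PySem.List.len] at hin; omega
  have hdrop : cs.drop i.toNat = cs[i.toNat] :: cs.drop (i.toNat + 1) :=
    List.drop_eq_getElem_cons hinat
  rw [PySem.List.pyRange_one_cons hin]
  simp only [innerA]
  set c := cs[i.toNat] with hc
  have hsub : PySem.List.slice cs (some i) (some (i + 1)) = [c] := by
    rw [PySem.List.slice_toNat cs hi (by omega)]
    have : (i + 1).toNat - i.toNat = 1 := by omega
    rw [this, hdrop]
    simp
  rw [hsub, isDistinctA_eq_allEq]
  have hall : allEq [c] = true := by simp [allEq]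
  rw [if_pos hall]
  simp only [runAt, hdrop, List.length_cons]
  have hstep := innerA_len cs i hi c (cs.length - (i + 1).toNat) (i + 1) (by omega)
    (by simp [PySem.List.len] at hin ⊢; omega) rfl
    (by
      have h1 : (i + 1).toNat - i.toNat = 1 := by omega
      rw [h1, hdrop]
      simp)
  have hdrop1 : cs.drop (i + 1).toNat = cs.drop (i.toNat + 1) := by
    congr 1; omega
  rw [hdrop1] at hstep
  push_cast
  rw [hstep]
  ring

theorem sum_runAt (cs : List Char) :
    (((List.range cs.length).map (runAt cs)).sum : Int) = startSum cs := by
  induction cs with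
  | nil => simp [startSum]
  | cons c r ih =>
    rw [List.length_cons, List.range_succ_eq_map]
    simp only [List.map_cons, List.map_map, List.sum_cons]
    have h0 : runAt (c :: r) 0 = 1 + ((r.takeWhile (· == c)).length : Int) := rfl
    have hshift : (List.range r.length).map (runAt (c :: r) ∘ Nat.succ)
        = (List.range r.length).map (runAt r) := by
      apply List.map_congr_left
      intro k _
      simp [runAt, Function.comp]
    rw [h0, hshift, ih, startSum]

theorem a_sum (cs : List Char) :
    ((PySem.List.pyRange 0 (cs.length : Int) 1).map
       (fun a => ((innerA cs a (PySem.List.pyRange a (cs.length : Int) 1)).length : Int))).sum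
      = startSum cs := by
  rw [PySem.List.pyRange_one]
  have h0 : ((cs.length : Int) - 0).toNat = cs.length := by omega
  rw [h0, List.map_map, ← sum_runAt cs]
  refine congrArg List.sum ?_
  apply List.map_congr_left
  intro k hk
  have hk' : k < cs.length := List.mem_range.mp hk
  simp only [Function.comp_apply]
  rw [zero_add]
  have := innerA_total cs (k : Int) (by positivity)
    (by simp [PySem.List.len]; omega)
  simpa [PySem.List.len, Int.toNat_natCast] using this

theorem a_eq_startSum (s : String) :
    numberOfDistinctSubstringPresent s = startSum s.toList := by
  unfold numberOfDistinctSubstringPresent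
  set cs := s.toList with hcs
  simp only [PySem.List.len]
  rw [PySem.List.foldl_append_eq_flatMap]
  simp only [List.nil_append, List.length_flatMap]
  rw [← a_sum cs, Nat.cast_list_sum, List.map_map]
  rfl

-- ===== VERDICT (by name: the statement is the Claim_ definition above) =====
theorem numberOfDistinctSubstringPresent_spec : Claim_equal_numberOfDistinctSubstringPresent := by
  intro s _
  unfold Spec_numberOfDistinctSubstringPresent
  rw [a_eq_startSum, alt_eq_startSum]
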